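-- pv_equiv track=rewrite | github.com/baolgn/Introduction-to-Programming-and-Problem-Solving | Lab/Lab 9/lab9_q5.py | organize_into_profits_losses
-- ===== SOURCE A (Python) =====
-- def organize_into_profits_losses(lst):
--     result = []
--     current_period = []
--
--     for num in lst:
--         if not current_period:
--             current_period.append(num)
--         else:
--             if (num >= 0 and current_period[-1] >= 0) or (num < 0 and current_period[-1] < 0):
--                 current_period.append(num)
--             else:
--                 result.append(current_period)
--                 current_period = [num]
--
--     if current_period:
--         result.append(current_period)
--
--     return result
-- ===== SOURCE B (Python) =====
-- def organize_into_profits_losses(lst):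
--     if not lst:
--         return []
--     n = len(lst)
--     cuts = [0] + [i for i in range(1, n) if (lst[i] >= 0) != (lst[i - 1] >= 0)] + [n]
--     return [lst[a:b] for a, b in zip(cuts, cuts[1:])]
-- ===== Notes on version B (the rewrite author's own statement) =====
-- stated objective: alternative
-- what changed: Two staged passes instead of A's single accumulator loop: first compute the list of sign-change cut indices by scanning adjacent index pairs, then materialize each group by slicing the list between consecutive cut points.
import Mathlib
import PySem

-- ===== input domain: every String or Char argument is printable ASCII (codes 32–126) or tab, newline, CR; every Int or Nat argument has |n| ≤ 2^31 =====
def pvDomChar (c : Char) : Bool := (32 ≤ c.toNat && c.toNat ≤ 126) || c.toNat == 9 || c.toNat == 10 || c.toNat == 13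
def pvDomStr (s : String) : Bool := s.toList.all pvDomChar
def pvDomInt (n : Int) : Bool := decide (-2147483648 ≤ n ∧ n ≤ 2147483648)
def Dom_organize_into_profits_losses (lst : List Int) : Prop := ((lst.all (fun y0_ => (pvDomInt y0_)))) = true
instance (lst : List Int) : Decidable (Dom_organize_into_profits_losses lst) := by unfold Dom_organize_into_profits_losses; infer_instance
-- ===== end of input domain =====

-- B replaces A's single accumulator-and-flush loop by two staged passes (Python: compute the sign-change cut indices, then slice between consecutive cuts); same O(n) cost, a different decomposition.


-- ===== PORT A =====
-- literal transliteration of A: a fold carrying (result, current_period), then the final flush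
def organize_into_profits_losses (lst : List Int) : List (List Int) :=
  let st := lst.foldl (fun (p : List (List Int) × List Int) num =>
    if p.2 = [] then (p.1, p.2 ++ [num])
    else if (num ≥ 0 ∧ p.2.getLast! ≥ 0) ∨ (num < 0 ∧ p.2.getLast! < 0) then (p.1, p.2 ++ [num])
    else (p.1 ++ [p.2], [num])) ([], [])
  if st.2 ≠ [] then st.1 ++ [st.2] else st.1

-- ===== PORT B =====
-- port of B: cuts = [0] + [i for i in range(1, n) if (lst[i] >= 0) != (lst[i-1] >= 0)] + [n];
-- result = [lst[a:b] for a, b in zip(cuts, cuts[1:])].  Every produced index is in range, so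
-- pyGetD's default is never used; cuts[1:] is cuts.tail.
def organize_into_profits_losses_alt (lst : List Int) : List (List Int) :=
  if lst = [] then []
  else
    let n : Int := lst.length
    let cuts : List Int :=
      [0] ++ (PySem.List.pyRange 1 n).filter (fun i =>
        (decide (PySem.List.pyGetD lst i 0 ≥ 0)) != (decide (PySem.List.pyGetD lst (i - 1) 0 ≥ 0))) ++ [n]
    (cuts.zip cuts.tail).map (fun p => PySem.List.slice lst (some p.1) (some p.2))

-- ===== PRECONDITION & SPEC =====
def Spec_organize_into_profits_losses (lst : List Int) (out : List (List Int)) : Prop := out = organize_into_profits_losses_alt lst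
instance (lst : List Int) (out : List (List Int)) : Decidable (Spec_organize_into_profits_losses lst out) := by unfold Spec_organize_into_profits_losses; infer_instance

-- ===== CLAIM (what is proved, stated in full; the proofs are below) =====
def Claim_equal_organize_into_profits_losses : Prop := ∀ (lst : List Int), Dom_organize_into_profits_losses lst → Spec_organize_into_profits_losses lst (organize_into_profits_losses lst)

-- ===== LEMMAS AND PROOFS =====

-- `runs` is the proof-side characterization both ports are shown equal to: peel off the
-- maximal same-sign run each step.
def runs (lst : List Int) : List (List Int) :=
  match lst with
  | [] => []
  | x :: xs =>
    (x :: xs.takeWhile (fun y => decide (y ≥ 0) == decide (x ≥ 0))) ::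
      runs (xs.dropWhile (fun y => decide (y ≥ 0) == decide (x ≥ 0)))
termination_by lst.length
decreasing_by
  simpa using Nat.lt_succ_of_le (List.length_dropWhile_le _ _)

-- ---------- A = runs ----------

-- A's loop body and final flush, named for the proofs (definitionally equal to the port's code)
def stepA (p : List (List Int) × List Int) (num : Int) : List (List Int) × List Int :=
  if p.2 = [] then (p.1, p.2 ++ [num])
  else if (num ≥ 0 ∧ p.2.getLast! ≥ 0) ∨ (num < 0 ∧ p.2.getLast! < 0) then (p.1, p.2 ++ [num])
  else (p.1 ++ [p.2], [num])

def finishA (st : List (List Int) × List Int) : List (List Int) :=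
  if st.2 ≠ [] then st.1 ++ [st.2] else st.1

theorem A_eq (lst : List Int) :
    organize_into_profits_losses lst = finishA (lst.foldl stepA ([], [])) := rfl

theorem getLast!_mem_int : ∀ (l : List Int), l ≠ [] → l.getLast! ∈ l := by
  intro l h
  match l with
  | [x] => simp [List.getLast!]
  | x :: y :: ys =>
    have : (x :: y :: ys).getLast! = (y :: ys).getLast! := by
      simp [List.getLast!, List.getLast]
    rw [this]
    exact List.mem_cons_of_mem _ (getLast!_mem_int (y :: ys) (by simp))

theorem runs_cons (x : Int) (xs : List Int) :
    runs (x :: xs) =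
      (x :: xs.takeWhile (fun y => decide (y ≥ 0) == decide (x ≥ 0))) ::
        runs (xs.dropWhile (fun y => decide (y ≥ 0) == decide (x ≥ 0))) := by
  rw [runs]

-- a uniform-sign nonempty block followed by [] or an opposite-sign head splits off as one group
theorem runs_break (cur rest : List Int) (b : Bool) (hne : cur ≠ [])
    (hu : ∀ x ∈ cur, decide (x ≥ 0) = b)
    (hr : rest = [] ∨ ∃ y ys, rest = y :: ys ∧ decide (y ≥ 0) ≠ b) :
    runs (cur ++ rest) = cur :: runs rest := by
  match cur with
  | c :: cs =>
    have hc : decide (c ≥ 0) = b := hu c (List.mem_cons_self ..)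
    have hcs : cs.takeWhile (fun y => decide (y ≥ 0) == decide (c ≥ 0)) = cs :=
      List.takeWhile_eq_self_iff.mpr (fun x hx => by
        simp [hc, hu x (List.mem_cons_of_mem _ hx)])
    have hcs' : cs.dropWhile (fun y => decide (y ≥ 0) == decide (c ≥ 0)) = [] :=
      List.dropWhile_eq_nil_iff.mpr (fun x hx => by
        simp [hc, hu x (List.mem_cons_of_mem _ hx)])
    rw [List.cons_append, runs_cons, List.takeWhile_append, List.dropWhile_append, hcs, hcs']
    rcases hr with rfl | ⟨y, ys, rfl, hy⟩
    · simp
    · have hy' : (fun y => decide (y ≥ 0) == decide (c ≥ 0)) y = false := by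
        simp [hc]; intro h; exact absurd h hy
      simp [hy']

theorem main_inv : ∀ (rest cur : List Int) (acc : List (List Int)) (b : Bool),
    cur ≠ [] → (∀ x ∈ cur, decide (x ≥ 0) = b) →
    finishA (rest.foldl stepA (acc, cur)) = acc ++ runs (cur ++ rest) := by
  intro rest
  induction rest with
  | nil =>
    intro cur acc b hne hu
    have h := runs_break cur [] b hne hu (Or.inl rfl)
    rw [List.append_nil] at h
    rw [List.foldl_nil, List.append_nil, h]
    simp [finishA, hne, runs]
  | cons y ys ih =>
    intro cur acc b hne hu
    have hLast : decide (cur.getLast! ≥ 0) = b := hu _ (getLast!_mem_int cur hne)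
    rw [List.foldl_cons]
    by_cases hb : decide (y ≥ 0) = b
    · have hC : (y ≥ 0 ∧ cur.getLast! ≥ 0) ∨ (y < 0 ∧ cur.getLast! < 0) := by
        cases b <;> simp_all
      have hstep : stepA (acc, cur) y = (acc, cur ++ [y]) := by
        rw [show stepA (acc, cur) y = if cur = [] then (acc, cur ++ [y])
              else if (y ≥ 0 ∧ cur.getLast! ≥ 0) ∨ (y < 0 ∧ cur.getLast! < 0)
                then (acc, cur ++ [y]) else (acc ++ [cur], [y]) from rfl,
            if_neg hne, if_pos hC]
      rw [hstep, ih (cur ++ [y]) acc b (by simp)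
        (fun x hx => by
          rcases List.mem_append.mp hx with h | h
          · exact hu x h
          · simp at h; simp [h, hb])]
      simp
    · have hC : ¬ ((y ≥ 0 ∧ cur.getLast! ≥ 0) ∨ (y < 0 ∧ cur.getLast! < 0)) := by
        cases b <;> simp_all
      have hstep : stepA (acc, cur) y = (acc ++ [cur], [y]) := by
        rw [show stepA (acc, cur) y = if cur = [] then (acc, cur ++ [y])
              else if (y ≥ 0 ∧ cur.getLast! ≥ 0) ∨ (y < 0 ∧ cur.getLast! < 0)
                then (acc, cur ++ [y]) else (acc ++ [cur], [y]) from rfl,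
            if_neg hne, if_neg hC]
      rw [hstep, ih [y] (acc ++ [cur]) (decide (y ≥ 0)) (by simp)
        (fun x hx => by simp at hx; simp [hx]),
        runs_break cur (y :: ys) b hne hu (Or.inr ⟨y, ys, rfl, hb⟩)]
      simp

theorem A_eq_runs (lst : List Int) : organize_into_profits_losses lst = runs lst := by
  match lst with
  | [] => rw [A_eq]; simp [finishA, runs]
  | x :: xs =>
    rw [A_eq, List.foldl_cons]
    have hstep : stepA ([], []) x = ([], [x]) := by simp [stepA]
    rw [hstep, main_inv xs [x] [] (decide (x ≥ 0)) (by simp)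
      (fun z hz => by simp at hz; simp [hz])]
    simp

-- ---------- B = runs ----------

-- the interior sign-change cut indices of l (B's filtered range)
def bdry (l : List Int) : List Int :=
  (PySem.List.pyRange 1 (l.length : Int)).filter (fun i =>
    (decide (PySem.List.pyGetD l i 0 ≥ 0)) != (decide (PySem.List.pyGetD l (i - 1) 0 ≥ 0)))

def cuts (l : List Int) : List Int := [0] ++ bdry l ++ [(l.length : Int)]

def chop (l : List Int) (c : List Int) : List (List Int) :=
  (c.zip c.tail).map (fun p => PySem.List.slice l (some p.1) (some p.2))

theorem B_eq (lst : List Int) (h : ¬ lst = []) :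
    organize_into_profits_losses_alt lst = chop lst (cuts lst) := by
  simp [organize_into_profits_losses_alt, h, chop, cuts, bdry]

theorem key_of_getD (l : List Int) (b : Bool) (hu : ∀ x ∈ l, decide (x ≥ 0) = b)
    (j : Nat) (h : j < l.length) : decide (l.getD j 0 ≥ 0) = b := by
  rw [List.getD_eq_getElem l 0 h]; exact hu _ (List.getElem_mem h)

theorem pyGetD_shift (run d : List Int) (t : Int) (ht : 0 ≤ t) :
    PySem.List.pyGetD (run ++ d) ((run.length : Int) + t) 0 = PySem.List.pyGetD d t 0 := by
  rw [PySem.List.pyGetD_of_nonneg _ _ (by omega), PySem.List.pyGetD_of_nonneg _ _ ht,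
    List.getD_append_right _ _ _ _ (by omega)]
  congr 1; omega

theorem bdry_peel (run d : List Int) (b : Bool) (hne : run ≠ [])
    (hu : ∀ x ∈ run, decide (x ≥ 0) = b)
    (hd : d = [] ∨ ∃ y ys, d = y :: ys ∧ decide (y ≥ 0) ≠ b) :
    bdry (run ++ d) =
      if d = [] then [] else (run.length : Int) :: (bdry d).map (· + (run.length : Int)) := by
  have hk : 0 < run.length := List.length_pos_of_ne_nil hne
  have hleft : ∀ i ∈ PySem.List.pyRange 1 (run.length : Int),
      ((decide (PySem.List.pyGetD (run ++ d) i 0 ≥ 0)) !=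
        (decide (PySem.List.pyGetD (run ++ d) (i - 1) 0 ≥ 0))) = false := by
    intro i hi
    obtain ⟨h1, h2⟩ := PySem.List.mem_pyRange_one.mp hi
    rw [PySem.List.pyGetD_of_nonneg _ _ (by omega), PySem.List.pyGetD_of_nonneg _ _ (by omega),
      List.getD_append _ _ _ _ (by omega), List.getD_append _ _ _ _ (by omega),
      key_of_getD run b hu i.toNat (by omega), key_of_getD run b hu (i - 1).toNat (by omega)]
    simp
  rcases hd with rfl | ⟨y, ys, rfl, hy⟩
  · rw [List.append_nil] at hleft ⊢
    rw [if_pos rfl]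
    unfold bdry
    exact List.filter_eq_nil_iff.mpr (fun i hi => by simp [hleft i hi])
  · rw [if_neg (by simp)]
    unfold bdry
    have hlen : (((run ++ y :: ys).length : Nat) : Int) = (run.length : Int) + ((y :: ys).length : Int) := by
      rw [List.length_append, Nat.cast_add]
    have hpos : (run.length : Int) < (run.length : Int) + ((y :: ys).length : Int) := by
      have : 0 < (y :: ys).length := by simp
      omega
    rw [hlen,
      PySem.List.pyRange_one_append 1 (run.length : Int) _ (by exact_mod_cast hk) (by omega),
      List.filter_append,
      List.filter_eq_nil_iff.mpr (fun i hi => by simp [hleft i hi]),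
      PySem.List.pyRange_one_cons hpos,
      List.filter_cons, List.nil_append]
    have hPk : ((decide (PySem.List.pyGetD (run ++ y :: ys) (run.length : Int) 0 ≥ 0)) !=
        (decide (PySem.List.pyGetD (run ++ y :: ys) ((run.length : Int) - 1) 0 ≥ 0))) = true := by
      have e1 : PySem.List.pyGetD (run ++ y :: ys) (run.length : Int) 0 = y := by
        have h0 := pyGetD_shift run (y :: ys) 0 le_rfl
        simp only [add_zero] at h0
        rw [h0]
        simp [PySem.List.pyGetD]
      have e2 : decide (PySem.List.pyGetD (run ++ y :: ys) ((run.length : Int) - 1) 0 ≥ 0) = b := by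
        rw [PySem.List.pyGetD_of_nonneg _ _ (by omega),
          List.getD_append _ _ _ _ (by omega),
          key_of_getD run b hu _ (by omega)]
      rw [e1, e2]
      revert hy; cases b <;> cases hyy : decide (y ≥ 0) <;> simp
    rw [if_pos hPk]
    congr 1
    rw [PySem.List.pyRange_one ((run.length : Int) + 1), PySem.List.pyRange_one 1 ((y :: ys).length : Int),
      List.filter_map, List.filter_map, List.map_map]
    have harg : (((run.length : Int) + ((y :: ys).length : Int)) - ((run.length : Int) + 1)).toNat
        = ((((y :: ys).length : Int)) - 1).toNat := by omega
    rw [harg]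
    rw [List.filter_congr (l := List.range ((((y :: ys).length : Int)) - 1).toNat)
      (q := (fun i => (decide (PySem.List.pyGetD (y :: ys) i 0 ≥ 0)) !=
        (decide (PySem.List.pyGetD (y :: ys) (i - 1) 0 ≥ 0))) ∘ (fun k : Nat => 1 + (k : Int)))
      (fun j _ => by
        simp only [Function.comp]
        have e1 : (run.length : Int) + 1 + (j : Int) = (run.length : Int) + (1 + (j : Int)) := by ring
        have e2 : (run.length : Int) + (1 + (j : Int)) - 1 = (run.length : Int) + (j : Int) := by ring
        have e3 : (1 : Int) + (j : Int) - 1 = (j : Int) := by ring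
        simp only [e1, e2, e3, pyGetD_shift run (y :: ys) (1 + (j : Int)) (by omega),
          pyGetD_shift run (y :: ys) ((j : Int)) (by omega)])]
    apply List.map_congr_left
    intro j _
    show (run.length : Int) + 1 + (j : Int) = (1 + (j : Int)) + (run.length : Int)
    ring

theorem slice_shift (run d : List Int) (x y : Int) (hx : 0 ≤ x) (hy : 0 ≤ y) :
    PySem.List.slice (run ++ d) (some (x + (run.length : Int))) (some (y + (run.length : Int))) =
      PySem.List.slice d (some x) (some y) := by
  rw [PySem.List.slice_toNat _ (by omega) (by omega), PySem.List.slice_toNat _ hx hy]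
  have hx' : (x + (run.length : Int)).toNat = x.toNat + run.length := by omega
  have hy' : (y + (run.length : Int)).toNat = y.toNat + run.length := by omega
  rw [hx', hy', List.drop_append]
  have : run.length ≤ x.toNat + run.length := by omega
  rw [List.drop_eq_nil_of_le this]
  simp
  congr 1
  omega

theorem cuts_nonneg (l : List Int) : ∀ x ∈ cuts l, 0 ≤ x := by
  intro x hx
  simp [cuts, bdry] at hx
  rcases hx with rfl | hx | rfl
  · rfl
  · omega
  · exact Int.natCast_nonneg _

theorem chop_shift (run d : List Int) (c : List Int) (hc : ∀ x ∈ c, 0 ≤ x) :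
    chop (run ++ d) (c.map (· + (run.length : Int))) = chop d c := by
  unfold chop
  rw [← List.map_tail, List.zip_map, List.map_map]
  apply List.map_congr_left
  intro p hp
  obtain ⟨h1, h2⟩ := List.of_mem_zip hp
  exact slice_shift run d p.1 p.2 (hc _ h1) (hc _ (List.mem_of_mem_tail h2))

theorem chop_cons (l : List Int) (a b : Int) (rest : List Int) :
    chop l (a :: b :: rest) = PySem.List.slice l (some a) (some b) :: chop l (b :: rest) := rfl

theorem chop_full (l : List Int) : chop l [0, (l.length : Int)] = [l] := by
  unfold chop
  simp [PySem.List.slice_toNat l (le_refl (0:Int)) (Int.natCast_nonneg _)]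

theorem cuts_head (l : List Int) : ∃ rest, cuts l = 0 :: rest := ⟨bdry l ++ [(l.length : Int)], rfl⟩

theorem alt_eq_runs_aux : ∀ (n : Nat) (lst : List Int), lst.length ≤ n →
    organize_into_profits_losses_alt lst = runs lst := by
  intro n
  induction n with
  | zero =>
    intro lst h
    have : lst = [] := List.eq_nil_of_length_eq_zero (by omega)
    subst this
    simp [organize_into_profits_losses_alt, runs]
  | succ n ih =>
    intro lst hlen
    match lst with
    | [] => simp [organize_into_profits_losses_alt, runs]
    | c :: cs =>
      have hne : ¬ (c :: cs = ([] : List Int)) := by simp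
      obtain ⟨t, dd, ht, hdd⟩ : ∃ t dd,
          cs.takeWhile (fun y => decide (y ≥ 0) == decide (c ≥ 0)) = t ∧
          cs.dropWhile (fun y => decide (y ≥ 0) == decide (c ≥ 0)) = dd := ⟨_, _, rfl, rfl⟩
      have hsplit : c :: cs = (c :: t) ++ dd := by
        rw [← ht, ← hdd]; simp [List.takeWhile_append_dropWhile]
      have hu : ∀ x ∈ c :: t, decide (x ≥ 0) = decide (c ≥ 0) := by
        intro x hx
        rcases List.mem_cons.mp hx with rfl | hx
        · rfl
        · have hmem : x ∈ cs.takeWhile (fun y => decide (y ≥ 0) == decide (c ≥ 0)) := by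
            rw [ht]; exact hx
          have h2 := List.mem_takeWhile_imp hmem
          simp only [beq_iff_eq, decide_eq_decide] at h2
          simp [h2]
      have hd : dd = [] ∨ ∃ y ys, dd = y :: ys ∧ decide (y ≥ 0) ≠ decide (c ≥ 0) := by
        match hdd2 : dd with
        | [] => exact Or.inl rfl
        | y :: ys =>
          refine Or.inr ⟨y, ys, rfl, ?_⟩
          have hh := List.head_dropWhile_not (fun y => decide (y ≥ 0) == decide (c ≥ 0))
            (l := cs) (by rw [hdd]; simp)
          simp [hdd] at hh
          simp [decide_eq_decide]
          exact fun h => hh (by simp [h])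
      have hruns : runs (c :: cs) = (c :: t) :: runs dd := by
        rw [runs_cons, ht, hdd]
      have hddlen : dd.length ≤ n := by
        have h1 : dd.length ≤ cs.length := hdd ▸ List.length_dropWhile_le _ _
        simp at hlen; omega
      rw [B_eq _ hne, hruns, hsplit]
      rcases hd with hdnil | ⟨y, ys, hdy, hkey⟩
      · rw [hdnil, List.append_nil]
        have hb : bdry (c :: t) = [] := by
          have := bdry_peel (c :: t) [] (decide (c ≥ 0)) (by simp) hu (Or.inl rfl)
          simpa using this
        rw [show cuts (c :: t) = [0, ((c :: t).length : Int)] by simp [cuts, hb]]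
        rw [chop_full]
        simp [runs]
      · have hdne : dd ≠ ([] : List Int) := by rw [hdy]; simp
        have hcuts : cuts ((c :: t) ++ dd) = 0 :: (cuts dd).map (· + ((c :: t).length : Int)) := by
          unfold cuts
          rw [bdry_peel (c :: t) dd (decide (c ≥ 0)) (by simp) hu (Or.inr ⟨y, ys, hdy, hkey⟩),
            if_neg hdne]
          simp
          omega
        rw [hcuts]
        obtain ⟨rest, hrest⟩ := cuts_head dd
        rw [hrest, List.map_cons]
        rw [show chop ((c :: t) ++ dd)
              (0 :: ((0 : Int) + ((c :: t).length : Int)) :: rest.map (· + ((c :: t).length : Int)))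
              = PySem.List.slice ((c :: t) ++ dd) (some 0) (some ((0 : Int) + ((c :: t).length : Int)))
                :: chop ((c :: t) ++ dd)
                  (((0 : Int) + ((c :: t).length : Int)) :: rest.map (· + ((c :: t).length : Int))) from
          chop_cons _ _ _ _]
        rw [show (((0 : Int) + ((c :: t).length : Int)) :: rest.map (· + ((c :: t).length : Int)))
              = (0 :: rest).map (· + ((c :: t).length : Int)) by simp]
        rw [← hrest, chop_shift _ _ _ (cuts_nonneg dd)]
        rw [← B_eq _ hdne, ih dd hddlen]
        congr 1
        rw [show ((0 : Int) + ((c :: t).length : Int)) = ((c :: t).length : Int) by ring,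
          PySem.List.slice_toNat _ le_rfl (Int.natCast_nonneg _)]
        simp

theorem alt_eq_runs (lst : List Int) : organize_into_profits_losses_alt lst = runs lst :=
  alt_eq_runs_aux lst.length lst le_rfl

-- ===== VERDICT (by name: the statement is the Claim_ definition above) =====
theorem organize_into_profits_losses_spec : Claim_equal_organize_into_profits_losses := by
  intro lst _
  unfold Spec_organize_into_profits_losses
  rw [A_eq_runs, alt_eq_runs]
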